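-- pv_equiv track=rewrite | github.com/jswarburton/advent-of-code | main/year2024/day_22.py | generate_secret_number
-- ===== SOURCE A (Python) =====
-- def generate_secret_number(initial_number, steps=2000):
--     def prune(number):
--         return number % 16777216
--
--     def mix(number, value):
--         return number ^ value
--
--     secret_number = initial_number
--     for _ in range(steps):
--         secret_number = prune(mix(secret_number, secret_number * 64))
--         secret_number = prune(mix(secret_number, secret_number // 32))
--         secret_number = prune(mix(secret_number, secret_number * 2048))
--
--     return secret_number
-- ===== SOURCE B (Python) =====
-- def generate_secret_number(initial_number, steps=2000):
--     if steps <= 0: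
--         return initial_number
--
--     def _step(x):
--         x = (x ^ (x * 64)) % 16777216
--         x = (x ^ (x // 32)) % 16777216
--         return (x ^ (x * 2048)) % 16777216
--
--     def _apply(cols, x):
--         # apply the GF(2)-linear map whose columns are cols to x
--         r = 0
--         for c in cols:
--             if x % 2 == 1:
--                 r ^= c
--             x //= 2
--         return r
--
--     cols = [_step(2 ** i) for i in range(24)]  # matrix of one PRNG step
--     s = _step(initial_number)                  # first step directly (handles any seed)
--     n = steps - 1
--     while n > 0:                               # binary exponentiation of the matrix
--         if n % 2 == 1:
--             s = _apply(cols, s)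
--         cols = [_apply(cols, c) for c in cols]
--         n //= 2
--     return s
-- ===== Notes on version B (the rewrite author's own statement) =====
-- stated objective: faster
-- what changed: Instead of iterating the PRNG step `steps` times, B represents the step as a GF(2)-linear map on 24 bits (24 columns) and applies it via binary matrix exponentiation, after one direct step to normalise the seed.
import Mathlib
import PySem

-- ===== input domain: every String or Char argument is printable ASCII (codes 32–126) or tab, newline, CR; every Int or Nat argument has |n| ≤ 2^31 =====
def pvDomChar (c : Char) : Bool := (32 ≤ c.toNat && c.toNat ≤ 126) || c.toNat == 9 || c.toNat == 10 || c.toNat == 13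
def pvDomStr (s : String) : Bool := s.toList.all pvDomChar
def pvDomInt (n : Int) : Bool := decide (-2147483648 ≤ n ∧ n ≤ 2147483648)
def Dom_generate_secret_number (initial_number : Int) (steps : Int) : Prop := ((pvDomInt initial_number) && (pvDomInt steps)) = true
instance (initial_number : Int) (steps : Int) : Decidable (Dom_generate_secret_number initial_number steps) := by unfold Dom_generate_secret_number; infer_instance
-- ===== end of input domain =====

-- B replaces the O(steps) iteration of the PRNG step by binary exponentiation of the
-- step viewed as a GF(2)-linear map on 24 bits (asymptotically faster, measured faster).

-- ===== PORT A =====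
def pvPrune (number : Int) : Int := PySem.Int.mod number 16777216

def pvMix (number value : Int) : Int := PySem.Int.bxor number value

def generate_secret_number (initial_number : Int) (steps : Int) : Int :=
  (PySem.List.pyRange 0 steps 1).foldl (fun secret_number _ =>
    let s1 := pvPrune (pvMix secret_number (secret_number * 64))
    let s2 := pvPrune (pvMix s1 (PySem.Int.floordiv s1 32))
    pvPrune (pvMix s2 (s2 * 2048))) initial_number

-- ===== PORT B =====
-- _step of Source B
def pvStep (x : Int) : Int :=
  let a := PySem.Int.mod (PySem.Int.bxor x (x * 64)) 16777216
  let b := PySem.Int.mod (PySem.Int.bxor a (PySem.Int.floordiv a 32)) 16777216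
  PySem.Int.mod (PySem.Int.bxor b (b * 2048)) 16777216

-- _apply of Source B: fold over the columns with state (r, x)
def pvApply (cols : List Int) (x : Int) : Int :=
  (cols.foldl (fun (st : Int × Int) c =>
      (if PySem.Int.mod st.2 2 = 1 then PySem.Int.bxor st.1 c else st.1,
       PySem.Int.floordiv st.2 2)) (0, x)).1

-- the `while n > 0` loop of Source B
def pvLoop (cols : List Int) (s : Int) (n : Int) : Int :=
  if _h : 0 < n then
    pvLoop (cols.map (pvApply cols))
      (if PySem.Int.mod n 2 = 1 then pvApply cols s else s)
      (PySem.Int.floordiv n 2)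
  else s
termination_by n.toNat
decreasing_by
  have := PySem.Int.floordiv_eq_ediv_of_pos (a := n) (b := 2) (by omega)
  rw [this]; omega

def generate_secret_number_alt (initial_number : Int) (steps : Int) : Int :=
  if steps ≤ 0 then initial_number
  else
    let cols := (PySem.List.pyRange 0 24 1).map (fun i => pvStep (2 ^ i.toNat))
    pvLoop cols (pvStep initial_number) (steps - 1)

-- ===== PRECONDITION & SPEC =====
def Spec_generate_secret_number (initial_number : Int) (steps : Int) (out : Int) : Prop := out = generate_secret_number_alt initial_number steps
instance (initial_number : Int) (steps : Int) (out : Int) : Decidable (Spec_generate_secret_number initial_number steps out) := by unfold Spec_generate_secret_number; infer_instance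

-- ===== CLAIM (what is proved, stated in full; the proofs are below) =====
def Claim_equal_generate_secret_number : Prop := ∀ (initial_number : Int) (steps : Int), Dom_generate_secret_number initial_number steps → Spec_generate_secret_number initial_number steps (generate_secret_number initial_number steps)

-- ===== LEMMAS AND PROOFS =====

-- Nat-level mirror of one PRNG step
def pvN1 (x : Nat) : Nat := (x ^^^ x * 64) % 16777216
def pvN2 (x : Nat) : Nat := (x ^^^ x / 32) % 16777216
def pvN3 (x : Nat) : Nat := (x ^^^ x * 2048) % 16777216
def pvNStep (x : Nat) : Nat := pvN3 (pvN2 (pvN1 x))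

theorem pv_xor_mul_pow (n a b : Nat) : (a ^^^ b) * 2 ^ n = a * 2 ^ n ^^^ b * 2 ^ n := by
  simp only [← Nat.shiftLeft_eq]
  apply Nat.eq_of_testBit_eq; intro i
  simp [Nat.testBit_shiftLeft, Nat.testBit_xor]
  cases h : decide (n ≤ i) <;> simp

theorem pv_xor_div_pow (n a b : Nat) : (a ^^^ b) / 2 ^ n = a / 2 ^ n ^^^ b / 2 ^ n := by
  simp only [← Nat.shiftRight_eq_div_pow]
  apply Nat.eq_of_testBit_eq; intro i
  simp [Nat.testBit_shiftRight, Nat.testBit_xor]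

theorem pv_xor_mod_pow (n a b : Nat) : (a ^^^ b) % 2 ^ n = a % 2 ^ n ^^^ b % 2 ^ n := by
  apply Nat.eq_of_testBit_eq; intro i
  simp [Nat.testBit_mod_two_pow, Nat.testBit_xor]
  cases h : decide (i < n) <;> simp

theorem pvN1_xor (a b : Nat) : pvN1 (a ^^^ b) = pvN1 a ^^^ pvN1 b := by
  have h1 : (a ^^^ b) * 64 = a * 64 ^^^ b * 64 := pv_xor_mul_pow 6 a b
  unfold pvN1
  rw [h1, show (16777216 : Nat) = 2 ^ 24 from rfl, ← pv_xor_mod_pow]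
  congr 1
  rw [Nat.xor_assoc, Nat.xor_comm b, Nat.xor_assoc, Nat.xor_assoc, Nat.xor_comm b]

theorem pvN2_xor (a b : Nat) : pvN2 (a ^^^ b) = pvN2 a ^^^ pvN2 b := by
  have h1 : (a ^^^ b) / 32 = a / 32 ^^^ b / 32 := pv_xor_div_pow 5 a b
  unfold pvN2
  rw [h1, show (16777216 : Nat) = 2 ^ 24 from rfl, ← pv_xor_mod_pow]
  congr 1
  rw [Nat.xor_assoc, Nat.xor_comm b, Nat.xor_assoc, Nat.xor_assoc, Nat.xor_comm b]

theorem pvN3_xor (a b : Nat) : pvN3 (a ^^^ b) = pvN3 a ^^^ pvN3 b := by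
  have h1 : (a ^^^ b) * 2048 = a * 2048 ^^^ b * 2048 := pv_xor_mul_pow 11 a b
  unfold pvN3
  rw [h1, show (16777216 : Nat) = 2 ^ 24 from rfl, ← pv_xor_mod_pow]
  congr 1
  rw [Nat.xor_assoc, Nat.xor_comm b, Nat.xor_assoc, Nat.xor_assoc, Nat.xor_comm b]

theorem pvNStep_xor (a b : Nat) : pvNStep (a ^^^ b) = pvNStep a ^^^ pvNStep b := by
  unfold pvNStep; rw [pvN1_xor, pvN2_xor, pvN3_xor]

theorem pvNStep_lt (x : Nat) : pvNStep x < 16777216 := by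
  unfold pvNStep pvN3; exact Nat.mod_lt _ (by norm_num)


-- recursive view of _apply
def pvNApply : List Nat → Nat → Nat
  | [], _ => 0
  | c :: cs, x => (if x % 2 = 1 then c else 0) ^^^ pvNApply cs (x / 2)

theorem pv_bit_split (x : Nat) : x % 2 ^^^ 2 * (x / 2) = x := by
  apply Nat.eq_of_testBit_eq; intro i
  cases i with
  | zero => simp [Nat.testBit_zero]
  | succ j =>
    have h1 : x % 2 / 2 = 0 := by omega
    have h2 : 2 * (x / 2) / 2 = x / 2 := by omega
    have h3 : (x % 2 ^^^ 2 * (x / 2)) / 2 = x % 2 / 2 ^^^ 2 * (x / 2) / 2 := by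
      simpa using pv_xor_div_pow 1 (x % 2) (2 * (x / 2))
    simp [Nat.testBit_succ, h3, h1, h2]

def pvColsOf (g : Nat → Nat) (k : Nat) : List Nat := (List.range k).map (fun i => g (2 ^ i))

theorem pvNApply_colsOf (g : Nat → Nat) (hg : ∀ a b, g (a ^^^ b) = g a ^^^ g b) :
    ∀ (k x : Nat), x < 2 ^ k → pvNApply (pvColsOf g k) x = g x := by
  intro k
  induction k generalizing g with
  | zero =>
    intro x hx
    have hg0 : g 0 = 0 := by have := hg 0 0; simpa using this
    interval_cases x
    simp [pvColsOf, pvNApply, hg0]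
  | succ k ih =>
    intro x hx
    have hg0 : g 0 = 0 := by have := hg 0 0; simpa using this
    have hcols : pvColsOf g (k + 1) = g 1 :: pvColsOf (fun y => g (2 * y)) k := by
      simp [pvColsOf, List.range_succ_eq_map, List.map_map, Function.comp_def, pow_succ,
        mul_comm]
    have hg' : ∀ a b, (fun y => g (2 * y)) (a ^^^ b) = (fun y => g (2 * y)) a ^^^ (fun y => g (2 * y)) b := by
      intro a b
      have h2 : 2 * (a ^^^ b) = 2 * a ^^^ 2 * b := by
        have := pv_xor_mul_pow 1 a b
        simpa [mul_comm] using this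
      simpa using by rw [h2, hg]
    have hx2 : x / 2 < 2 ^ k := by rw [pow_succ] at hx; omega
    rw [hcols]
    show (if x % 2 = 1 then g 1 else 0) ^^^ pvNApply (pvColsOf (fun y => g (2 * y)) k) (x / 2) = g x
    rw [ih (fun y => g (2 * y)) hg' (x / 2) hx2]
    have hbit : (if x % 2 = 1 then g 1 else 0) = g (x % 2) := by
      rcases Nat.mod_two_eq_zero_or_one x with h | h <;> simp [h, hg0]
    rw [hbit, ← hg, pv_bit_split]



-- cast bridges Int <-> Nat
def pvCastL (l : List Nat) : List Int := l.map Int.ofNat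

theorem pvCastL_nil : pvCastL [] = [] := rfl

theorem pvCastL_cons (c : Nat) (cs : List Nat) :
    pvCastL (c :: cs) = ((c : Nat) : Int) :: pvCastL cs := rfl

theorem pvStep_cast (x : Nat) : pvStep (x : Int) = (pvNStep x : Int) := by
  have hm : ∀ m : Nat, PySem.Int.mod (m : Int) 16777216 = ((m % 16777216 : Nat) : Int) :=
    fun m => by exact_mod_cast PySem.Int.mod_natCast m 16777216
  have hf : ∀ m : Nat, PySem.Int.floordiv (m : Int) 32 = ((m / 32 : Nat) : Int) :=
    fun m => by exact_mod_cast PySem.Int.floordiv_natCast m 32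
  have h64 : ∀ m : Nat, ((m : Int) * 64) = ((m * 64 : Nat) : Int) := by intro m; push_cast; ring
  have h2048 : ∀ m : Nat, ((m : Int) * 2048) = ((m * 2048 : Nat) : Int) := by
    intro m; push_cast; ring
  simp only [pvStep, pvNStep, pvN1, pvN2, pvN3, h64, h2048, PySem.Int.bxor_natCast, hf, hm]

theorem pvStep_bounds (z : Int) : 0 ≤ pvStep z ∧ pvStep z < 16777216 :=
  ⟨PySem.Int.mod_nonneg _ (by norm_num), PySem.Int.mod_lt _ (by norm_num)⟩

theorem pvApply_aux (cs : List Nat) : ∀ (r x : Nat),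
    ((pvCastL cs).foldl (fun (st : Int × Int) c =>
      (if PySem.Int.mod st.2 2 = 1 then PySem.Int.bxor st.1 c else st.1,
       PySem.Int.floordiv st.2 2)) (((r : Nat) : Int), ((x : Nat) : Int))).1
      = ((r ^^^ pvNApply cs x : Nat) : Int) := by
  induction cs with
  | nil => intro r x; simp [pvCastL_nil, pvNApply]
  | cons c cs ih =>
    intro r x
    have hm : PySem.Int.mod ((x : Nat) : Int) 2 = ((x % 2 : Nat) : Int) := by
      exact_mod_cast PySem.Int.mod_natCast x 2
    have hf : PySem.Int.floordiv ((x : Nat) : Int) 2 = ((x / 2 : Nat) : Int) := by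
      exact_mod_cast PySem.Int.floordiv_natCast x 2
    have hcond : (PySem.Int.mod ((x : Nat) : Int) 2 = 1) ↔ (x % 2 = 1) := by
      rw [hm]; exact_mod_cast Iff.rfl
    simp only [pvCastL_cons, List.foldl_cons]
    rw [hf]
    by_cases h : x % 2 = 1
    · rw [if_pos (hcond.mpr h), PySem.Int.bxor_natCast, ih (r ^^^ c) (x / 2)]
      simp [pvNApply, h, Nat.xor_assoc]
    · rw [if_neg (fun hc => h (hcond.mp hc)), ih r (x / 2)]
      simp [pvNApply, h]

theorem pvApply_cast (cs : List Nat) (x : Nat) :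
    pvApply (pvCastL cs) ((x : Nat) : Int) = ((pvNApply cs x : Nat) : Int) := by
  have := pvApply_aux cs 0 x
  simpa [pvApply] using this

theorem pv_foldl_const (f : Int → Int) : ∀ (l : List Int) (z : Int),
    l.foldl (fun s _ => f s) z = f^[l.length] z := by
  intro l
  induction l with
  | nil => intro z; rfl
  | cons a l ih =>
    intro z
    simp only [List.foldl_cons, List.length_cons]
    rw [ih, Function.iterate_succ_apply]

theorem pvStep_iterate_cast (k : Nat) : ∀ x : Nat, pvStep^[k] (x : Int) = (pvNStep^[k] x : Int) := by
  induction k with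
  | zero => intro x; rfl
  | succ k ih =>
    intro x
    rw [Function.iterate_succ_apply, Function.iterate_succ_apply, pvStep_cast, ih]

theorem pvColsOf_comp (g : Nat → Nat) (hg : ∀ a b, g (a ^^^ b) = g a ^^^ g b)
    (hb : ∀ x, g x < 16777216) :
    (pvColsOf g 24).map (pvNApply (pvColsOf g 24)) = pvColsOf (fun y => g (g y)) 24 := by
  simp only [pvColsOf, List.map_map]
  apply List.map_congr_left
  intro i _
  exact pvNApply_colsOf g hg 24 (g (2 ^ i)) (hb _)

theorem pvMap_apply (cols : List Nat) : ∀ l : List Nat,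
    (pvCastL l).map (pvApply (pvCastL cols)) = pvCastL (l.map (pvNApply cols)) := by
  intro l
  induction l with
  | nil => rfl
  | cons c l ih =>
    simp only [pvCastL_cons, List.map_cons]
    rw [pvApply_cast, ih]

-- semantics of the binary-exponentiation loop
theorem pvLoop_sem : ∀ (n : Nat) (g : Nat → Nat),
    (∀ a b, g (a ^^^ b) = g a ^^^ g b) → (∀ x, g x < 16777216) →
    ∀ s : Nat, s < 16777216 →
    pvLoop (pvCastL (pvColsOf g 24)) ((s : Nat) : Int) ((n : Nat) : Int) = ((g^[n] s : Nat) : Int) := by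
  intro n
  induction n using Nat.strong_induction_on with
  | _ n ih =>
    intro g hg hb s hs
    by_cases hn : n = 0
    · subst hn; rw [pvLoop]; simp
    · rw [pvLoop, dif_pos (show (0 : Int) < ((n : Nat) : Int) by exact_mod_cast Nat.pos_of_ne_zero hn)]
      have hm : PySem.Int.mod ((n : Nat) : Int) 2 = ((n % 2 : Nat) : Int) := by
        exact_mod_cast PySem.Int.mod_natCast n 2
      have hfd : PySem.Int.floordiv ((n : Nat) : Int) 2 = ((n / 2 : Nat) : Int) := by
        exact_mod_cast PySem.Int.floordiv_natCast n 2
      have hcols : (pvCastL (pvColsOf g 24)).map (pvApply (pvCastL (pvColsOf g 24))) =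
          pvCastL (pvColsOf (fun y => g (g y)) 24) := by
        rw [pvMap_apply, pvColsOf_comp g hg hb]
      have hg2 : ∀ a b, g (g (a ^^^ b)) = g (g a) ^^^ g (g b) := by
        intro a b; rw [hg, hg]
      have hb2 : ∀ x, g (g x) < 16777216 := fun x => hb _
      have hs' : (if n % 2 = 1 then g s else s) < 16777216 := by
        split
        · exact hb s
        · exact hs
      have hsval : (if PySem.Int.mod ((n : Nat) : Int) 2 = 1 then
          pvApply (pvCastL (pvColsOf g 24)) ((s : Nat) : Int) else ((s : Nat) : Int)) =
          (((if n % 2 = 1 then g s else s) : Nat) : Int) := by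
        by_cases h : n % 2 = 1
        · rw [if_pos (by rw [hm]; exact_mod_cast h), if_pos h, pvApply_cast,
            pvNApply_colsOf g hg 24 s hs]
        · rw [if_neg (by rw [hm]; intro hc; exact h (by exact_mod_cast hc)), if_neg h]
      rw [hcols, hsval, hfd]
      rw [ih (n / 2) (by omega) (fun y => g (g y)) hg2 hb2 _ hs']
      congr 1
      have hiter : (fun y => g (g y))^[n / 2] = g^[2 * (n / 2)] := by
        rw [Function.iterate_mul]
        congr 1
      rw [hiter]
      rcases Nat.mod_two_eq_zero_or_one n with h | h
      · rw [if_neg (by omega)]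
        congr 1
        omega
      · rw [if_pos h, ← Function.iterate_succ_apply]
        congr 1
        omega

-- A as an iterate
theorem pvA_iterate (initial_number steps : Int) :
    generate_secret_number initial_number steps = pvStep^[steps.toNat] initial_number := by
  show (PySem.List.pyRange 0 steps 1).foldl (fun s _ => pvStep s) initial_number = _
  rw [pv_foldl_const, PySem.List.length_pyRange_one]
  simp

-- B's column list is the cast of the Nat-level column list
theorem pvCols_port :
    (PySem.List.pyRange 0 24 1).map (fun i => pvStep (2 ^ i.toNat)) =
      pvCastL (pvColsOf pvNStep 24) := by
  have hr : pvCastL (pvColsOf pvNStep 24) =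
      List.map ((fun c : Nat => ((c : Nat) : Int)) ∘ (fun i : Nat => pvNStep (2 ^ i)))
        (List.range 24) := by
    rw [← List.map_map]; rfl
  rw [PySem.List.pyRange_one, List.map_map, hr]
  apply List.map_congr_left
  intro i _
  simp only [Function.comp_apply]
  have h1 : ((0 : Int) + (i : Nat)).toNat = i := by omega
  rw [h1]
  have h2 : ((2 : Int) ^ i) = (((2 ^ i : Nat) : Nat) : Int) := by push_cast; ring
  rw [h2, pvStep_cast]

-- ===== VERDICT (by name: the statement is the Claim_ definition above) =====
theorem generate_secret_number_spec : Claim_equal_generate_secret_number := by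
  intro initial_number steps _
  unfold Spec_generate_secret_number generate_secret_number_alt
  by_cases hle : steps ≤ 0
  · rw [if_pos hle, pvA_iterate]
    have : steps.toNat = 0 := by omega
    rw [this]; rfl
  · rw [if_neg hle]
    obtain ⟨k, hk⟩ : ∃ k : Nat, steps.toNat = k + 1 := ⟨steps.toNat - 1, by omega⟩
    have hb1 := pvStep_bounds initial_number
    obtain ⟨s1n, hs1n, hlt⟩ : ∃ m : Nat, pvStep initial_number = ((m : Nat) : Int) ∧ m < 16777216 :=
      ⟨(pvStep initial_number).toNat, by omega, by omega⟩
    have hminus : steps - 1 = ((k : Nat) : Int) := by omega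
    have hrhs : (let cols := (PySem.List.pyRange 0 24 1).map (fun i => pvStep (2 ^ i.toNat));
        pvLoop cols (pvStep initial_number) (steps - 1)) =
        pvLoop (pvCastL (pvColsOf pvNStep 24)) ((s1n : Nat) : Int) ((k : Nat) : Int) := by
      show pvLoop ((PySem.List.pyRange 0 24 1).map (fun i => pvStep (2 ^ i.toNat)))
        (pvStep initial_number) (steps - 1) = _
      rw [pvCols_port, hminus, hs1n]
    rw [hrhs, pvLoop_sem k pvNStep pvNStep_xor pvNStep_lt s1n hlt]
    rw [pvA_iterate, hk, Function.iterate_succ_apply, hs1n, pvStep_iterate_cast k s1n]
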